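-- pv_equiv track=rewrite | github.com/DigitalEnterpriseTransformation/pandas-ai | pandasai/helpers/save_chart.py | insert_desensitized_plot_call
-- ===== SOURCE A (Python) =====
-- def insert_desensitized_plot_call(code):
--     if "plt.savefig" in code and "desensitized_plot" not in code:
--         # Split the code into lines
--         lines = code.split('\n')
--
--         for i, line in enumerate(lines):
--             if "plt.savefig" in line:
--                 # Determine the indentation level of the plt.savefig line
--                 indent = len(line) - len(line.lstrip())
--                 indentation = ' ' * indent
--
--                 # Determine which desensitized_plot call to insert
--                 if 'plt.subplots' in code and 'fig' in code:
--                     code_to_add = f"{indentation}desensitized_plot(fig, use_subplots=True)\n"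
--                 else:
--                     code_to_add = f"{indentation}desensitized_plot(plt)\n"
--
--                 # Insert the desensitized_plot call before the plt.savefig line
--                 lines.insert(i, code_to_add)
--                 break
--
--         # Join the lines back into a single string
--         code = '\n'.join(lines)
--
--     return code
-- ===== SOURCE B (Python) =====
-- def insert_desensitized_plot_call(code):
--     if "plt.savefig" not in code or "desensitized_plot" in code:
--         return code
--     idx = code.find("plt.savefig")
--     line_start = code.rfind("\n", 0, idx) + 1
--     rest = code[line_start:]
--     nl = rest.find("\n")
--     line = rest if nl == -1 else rest[:nl]
--     indent = " " * (len(line) - len(line.lstrip()))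
--     if "plt.subplots" in code and "fig" in code:
--         call = "desensitized_plot(fig, use_subplots=True)\n"
--     else:
--         call = "desensitized_plot(plt)\n"
--     return code[:line_start] + indent + call + "\n" + rest
-- ===== Notes on version B (the rewrite author's own statement) =====
-- stated objective: alternative
-- what changed: B never builds a line list: it locates the first occurrence of the savefig marker with str.find, finds the start of that line with str.rfind of a newline bounded by that index, measures indentation on a slice of the raw string, and splices the inserted call in with string slicing, instead of A's split-into-lines / enumerate loop / list.insert / join.
import Mathlib
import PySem

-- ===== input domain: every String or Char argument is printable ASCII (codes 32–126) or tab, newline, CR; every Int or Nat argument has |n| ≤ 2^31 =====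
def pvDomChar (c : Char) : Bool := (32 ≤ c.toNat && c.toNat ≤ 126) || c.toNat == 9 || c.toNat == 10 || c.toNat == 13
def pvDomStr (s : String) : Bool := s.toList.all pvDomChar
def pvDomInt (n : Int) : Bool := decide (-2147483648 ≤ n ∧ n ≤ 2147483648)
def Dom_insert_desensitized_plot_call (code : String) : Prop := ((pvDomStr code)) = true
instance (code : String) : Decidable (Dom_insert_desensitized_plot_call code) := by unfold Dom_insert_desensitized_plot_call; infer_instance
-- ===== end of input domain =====

-- B re-implements the insertion on the raw string with find/rfind and slicing (no line list,
-- no enumerate loop): a genuinely different decomposition of the same task, same cost.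


-- ===== PORT A =====
-- the for-loop over enumerate(lines) with break: returns lines unchanged if no line matches,
-- else lines.insert(i, code_to_add) at the first matching index
def pvA_loop (code : String) (lines : List String) : List (Int × String) → List String
  | [] => lines
  | (i, line) :: rest =>
    if PySem.Str.isIn "plt.savefig" line then
      let indent : Int := PySem.Str.len line - PySem.Str.len (PySem.Str.lstrip line)
      let indentation : String := String.ofList (List.replicate indent.toNat ' ')
      let code_to_add : String :=
        if PySem.Str.isIn "plt.subplots" code && PySem.Str.isIn "fig" code then
          indentation ++ "desensitized_plot(fig, use_subplots=True)\n"
        else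
          indentation ++ "desensitized_plot(plt)\n"
      PySem.List.insert lines i code_to_add
    else pvA_loop code lines rest

def insert_desensitized_plot_call (code : String) : String :=
  if PySem.Str.isIn "plt.savefig" code && !PySem.Str.isIn "desensitized_plot" code then
    let lines : List String := (PySem.Str.split? code "\n").getD []
    PySem.Str.join "\n" (pvA_loop code lines (PySem.List.enumerate lines 0))
  else code

-- ===== PORT B =====
-- Source B: find the first "plt.savefig" occurrence, rfind the newline before it, slice and splice
def insert_desensitized_plot_call_alt (code : String) : String :=
  if !PySem.Str.isIn "plt.savefig" code || PySem.Str.isIn "desensitized_plot" code then code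
  else
    let idx : Int := PySem.Str.find code "plt.savefig"
    let line_start : Int := PySem.Str.rfindFrom code "\n" 0 (some idx) + 1
    let rest : String := PySem.Str.slice code (some line_start) none
    let nl : Int := PySem.Str.find rest "\n"
    let line : String := if nl = -1 then rest else PySem.Str.slice rest none (some nl)
    let indent : String := String.ofList (List.replicate
      (PySem.Str.len line - PySem.Str.len (PySem.Str.lstrip line)).toNat ' ')
    let call : String :=
      if PySem.Str.isIn "plt.subplots" code && PySem.Str.isIn "fig" code then
        "desensitized_plot(fig, use_subplots=True)\n"
      else "desensitized_plot(plt)\n"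
    PySem.Str.slice code none (some line_start) ++ indent ++ call ++ "\n" ++ rest

-- ===== PRECONDITION & SPEC =====
def Spec_insert_desensitized_plot_call (code : String) (out : String) : Prop := out = insert_desensitized_plot_call_alt code
instance (code : String) (out : String) : Decidable (Spec_insert_desensitized_plot_call code out) := by unfold Spec_insert_desensitized_plot_call; infer_instance

-- ===== CLAIM (what is proved, stated in full; the proofs are below) =====
def Claim_equal_insert_desensitized_plot_call : Prop := ∀ (code : String), Dom_insert_desensitized_plot_call code → Spec_insert_desensitized_plot_call code (insert_desensitized_plot_call code)

-- ===== LEMMAS AND PROOFS =====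

-- go shift
theorem pvGoShift (sub : List Char) : ∀ (l : List Char) (k : Nat),
    PySem.Chars.find.go sub l k =
      if PySem.Chars.find.go sub l 0 = -1 then -1 else (k : Int) + PySem.Chars.find.go sub l 0 := by
  intro l
  induction l with
  | nil =>
    intro k
    show (if sub.isEmpty then (k:Int) else -1) = _
    by_cases h : sub.isEmpty <;> simp [h, PySem.Chars.find.go]
  | cons c t ih =>
    intro k
    show (if sub.isPrefixOf (c::t) then (k:Int) else PySem.Chars.find.go sub t (k+1)) = _
    by_cases h : sub.isPrefixOf (c :: t)
    · simp [h, PySem.Chars.find.go]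
    · have h0 : PySem.Chars.find.go sub (c::t) 0 = PySem.Chars.find.go sub t 1 := by
        show (if sub.isPrefixOf (c::t) then ((0:Nat):Int) else PySem.Chars.find.go sub t 1) = _
        simp [h]
      have hge : -1 ≤ PySem.Chars.find.go sub t 0 := by
        have := PySem.Chars.neg_one_le_find t sub
        simpa [PySem.Chars.find] using this
      rw [if_neg h, ih (k+1), h0, ih 1]
      push_cast
      split_ifs <;> omega

theorem pvFindCons (sub : List Char) (c : Char) (t : List Char) :
    PySem.Chars.find (c :: t) sub =
      if sub.isPrefixOf (c :: t) then 0
      else if PySem.Chars.find t sub = -1 then -1 else 1 + PySem.Chars.find t sub := by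
  show PySem.Chars.find.go sub (c::t) 0 = _
  by_cases h : sub.isPrefixOf (c :: t)
  · show (if sub.isPrefixOf (c::t) then ((0:Nat):Int) else _) = _
    simp [h]
  · show (if sub.isPrefixOf (c::t) then ((0:Nat):Int) else PySem.Chars.find.go sub t 1) = _
    rw [if_neg h, if_neg h, pvGoShift sub t 1]
    rfl

-- straddle: a prefix of l0 ++ NL :: s' that avoids NL and is not a prefix of l0 is impossible
theorem pvCore (P l0 s' : List Char) (hNL : '\n' ∉ P) (h : ¬ P <+: l0) :
    ¬ P <+: (l0 ++ '\n' :: s') := by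
  intro hp
  by_cases hlen : P.length ≤ l0.length
  · exact h (List.prefix_of_prefix_length_le hp (List.prefix_append l0 ('\n'::s')) hlen)
  · have h2 : (l0 ++ ['\n']) <+: (l0 ++ '\n' :: s') := by
      refine ⟨s', by simp⟩
    have h3 : (l0 ++ ['\n']) <+: P := List.prefix_of_prefix_length_le h2 hp (by simp; omega)
    exact hNL (h3.subset (by simp))

theorem pvFindGe (s sub : List Char) : -1 ≤ PySem.Chars.find s sub := PySem.Chars.neg_one_le_find s sub

-- F1: first match beyond the first line
theorem pvF1 (P : List Char) (hNL : '\n' ∉ P) (hne : P ≠ []) :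
    ∀ (l0 s' : List Char), PySem.Chars.isIn P l0 = false →
    PySem.Chars.find (l0 ++ '\n' :: s') P =
      if PySem.Chars.find s' P = -1 then -1 else (l0.length : Int) + 1 + PySem.Chars.find s' P := by
  intro l0
  induction l0 with
  | nil =>
    intro s' _
    rw [List.nil_append, pvFindCons]
    have hpre : ¬ P.isPrefixOf ('\n' :: s') = true := by
      rw [List.isPrefixOf_iff_prefix]
      have := pvCore P [] s' hNL (by simp [List.prefix_iff_eq_take]; intro h; exact hne (by simpa using h))
      simpa using this
    rw [if_neg hpre]
    simp only [List.length_nil, Nat.cast_zero]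
    split_ifs <;> omega
  | cons c t ih =>
    intro s' hin
    have hnotpre_t : ¬ P <+: t := by
      intro hp
      have h2 : PySem.Chars.isIn P (c :: t) = true := by
        rw [PySem.Chars.isIn_iff_infix]
        exact List.infix_cons hp.isInfix
      rw [hin] at h2; cases h2
    have hint : PySem.Chars.isIn P t = false := by
      cases hpt : PySem.Chars.isIn P t with
      | false => rfl
      | true =>
        have h2 : PySem.Chars.isIn P (c :: t) = true := by
          rw [PySem.Chars.isIn_iff_infix] at hpt ⊢
          exact List.infix_cons hpt
        rw [hin] at h2; cases h2
    have hnotpre : ¬ P.isPrefixOf (c :: (t ++ '\n' :: s')) = true := by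
      rw [List.isPrefixOf_iff_prefix]
      have := pvCore P (c :: t) s' hNL (by
        intro hp
        have h2 : PySem.Chars.isIn P (c :: t) = true := by
          rw [PySem.Chars.isIn_iff_infix]; exact hp.isInfix
        rw [hin] at h2; cases h2)
      simpa using this
    rw [List.cons_append, pvFindCons, if_neg hnotpre, ih s' hint]
    have hge := pvFindGe s' P
    simp only [List.length_cons]
    push_cast
    split_ifs <;> omega

-- F2: match inside the first line
theorem pvF2 (P : List Char) (hNL : '\n' ∉ P) (hne : P ≠ []) :
    ∀ (l0 s' : List Char), PySem.Chars.isIn P l0 = true →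
    PySem.Chars.find (l0 ++ '\n' :: s') P = PySem.Chars.find l0 P := by
  intro l0
  induction l0 with
  | nil =>
    intro s' hin
    rw [PySem.Chars.isIn_iff_infix] at hin
    rw [List.infix_nil] at hin
    exact absurd hin hne
  | cons c t ih =>
    intro s' hin
    by_cases hp : P.isPrefixOf (c :: t) = true
    · have hp2 : P.isPrefixOf (c :: (t ++ '\n' :: s')) = true := by
        rw [List.isPrefixOf_iff_prefix] at hp ⊢
        have := hp.trans (List.prefix_append (c :: t) ('\n' :: s'))
        simpa using this
      rw [List.cons_append, pvFindCons, if_pos hp2, pvFindCons, if_pos hp]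
    · have hint : PySem.Chars.isIn P t = true := by
        rw [PySem.Chars.isIn_iff_infix] at hin ⊢
        rcases List.infix_cons_iff.mp hin with h | h
        · exact absurd (List.isPrefixOf_iff_prefix.mpr h) hp
        · exact h
      have hnotpre : ¬ P.isPrefixOf (c :: (t ++ '\n' :: s')) = true := by
        rw [List.isPrefixOf_iff_prefix]
        have := pvCore P (c :: t) s' hNL (fun h => hp (List.isPrefixOf_iff_prefix.mpr h))
        simpa using this
      rw [List.cons_append, pvFindCons, if_neg hnotpre, ih s' hint, pvFindCons, if_neg hp]

-- N1: position of the first newline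
theorem pvN1 : ∀ (l0 s' : List Char), '\n' ∉ l0 →
    PySem.Chars.find (l0 ++ '\n' :: s') ['\n'] = (l0.length : Int) := by
  intro l0
  induction l0 with
  | nil =>
    intro s' _
    rw [List.nil_append, pvFindCons, if_pos (by simp [List.isPrefixOf])]
    simp
  | cons c t ih =>
    intro s' hmem
    have hc : c ≠ '\n' := fun h => hmem (h ▸ List.mem_cons_self ..)
    have hnp : ¬ (['\n'].isPrefixOf (c :: (t ++ '\n' :: s'))) = true := by
      simp [List.isPrefixOf]
      exact fun h => hc h.symm
    rw [List.cons_append, pvFindCons, if_neg hnp, ih s' (fun h => hmem (List.mem_cons_of_mem c h))]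
    have : ¬ ((t.length : Int) = -1) := by omega
    rw [if_neg this]
    simp
    omega

-- N2: no newline, no find
theorem pvN2 (s : List Char) (h : '\n' ∉ s) : PySem.Chars.find s ['\n'] = -1 := by
  rw [PySem.Chars.find_eq_neg_one_iff]
  intro hinf
  exact h (hinf.subset (by simp))

-- rfind.go is ≥ -1
theorem pvRgoGe (s sub : List Char) : ∀ j : Nat, -1 ≤ PySem.Chars.rfind.go s sub j := by
  intro j
  induction j with
  | zero =>
    show -1 ≤ (if sub.isPrefixOf s then (0:Int) else -1)
    split_ifs <;> omega
  | succ j ih =>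
    show -1 ≤ (if sub.isPrefixOf (List.drop (j+1) s) then ((j:Int)+1) else PySem.Chars.rfind.go s sub j)
    split_ifs <;> omega

-- no newline anywhere: rfind.go for ['\n'] is -1
theorem pvR1go (s : List Char) (h : '\n' ∉ s) : ∀ j : Nat, PySem.Chars.rfind.go s ['\n'] j = -1 := by
  intro j
  induction j with
  | zero =>
    show (if ['\n'].isPrefixOf s then (0:Int) else -1) = -1
    rw [if_neg]
    intro hp
    rw [List.isPrefixOf_iff_prefix] at hp
    exact h (hp.subset (by simp))
  | succ j ih =>
    show (if ['\n'].isPrefixOf (List.drop (j+1) s) then ((j:Int)+1) else PySem.Chars.rfind.go s ['\n'] j) = -1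
    rw [if_neg, ih]
    intro hp
    rw [List.isPrefixOf_iff_prefix] at hp
    exact h (List.mem_of_mem_drop (hp.subset (by simp)))

theorem pvR1 (s : List Char) (h : '\n' ∉ s) : PySem.Chars.rfind s ['\n'] = -1 :=
  pvR1go s h s.length

-- rfind.go of l0 ++ '\n' :: t at index l0.length is exactly l0.length
theorem pvRat (l0 t : List Char) : PySem.Chars.rfind.go (l0 ++ '\n' :: t) ['\n'] l0.length = (l0.length : Int) := by
  have hdrop : List.drop l0.length (l0 ++ '\n' :: t) = '\n' :: t := List.drop_left
  cases hl : l0.length with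
  | zero =>
    show (if ['\n'].isPrefixOf (l0 ++ '\n' :: t) then (0:Int) else -1) = _
    have : l0 = [] := List.eq_nil_of_length_eq_zero hl
    subst this
    rw [if_pos (by simp [List.isPrefixOf])]
    simp
  | succ j =>
    show (if ['\n'].isPrefixOf (List.drop (j+1) (l0 ++ '\n' :: t)) then ((j:Int)+1) else _) = _
    rw [← hl, hdrop, if_pos (by simp [List.isPrefixOf])]
    omega

-- rfind.go equations
theorem pvRgoZero (s sub : List Char) :
    PySem.Chars.rfind.go s sub 0 = if sub.isPrefixOf s then 0 else -1 := rfl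

theorem pvRgoSucc (s sub : List Char) (j : Nat) :
    PySem.Chars.rfind.go s sub (j+1) =
      if sub.isPrefixOf (List.drop (j+1) s) then ((j:Int)+1) else PySem.Chars.rfind.go s sub j := rfl

theorem pvDropShift (l0 t : List Char) (m : Nat) :
    List.drop (l0.length + 1 + m) (l0 ++ '\n' :: t) = List.drop m t := by
  rw [List.drop_append, List.drop_eq_nil_of_le (by omega), List.nil_append]
  have h : l0.length + 1 + m - l0.length = m + 1 := by omega
  rw [h, List.drop_succ_cons]

-- shift lemma for rfind.go past the first line
theorem pvRshift (l0 t : List Char) : ∀ m : Nat, m ≤ t.length →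
    PySem.Chars.rfind.go (l0 ++ '\n' :: t) ['\n'] (l0.length + 1 + m) =
      if PySem.Chars.rfind.go t ['\n'] m = -1 then (l0.length : Int)
      else (l0.length : Int) + 1 + PySem.Chars.rfind.go t ['\n'] m := by
  intro m
  induction m with
  | zero =>
    intro _
    have h1 : l0.length + 1 + 0 = l0.length + 1 := by omega
    rw [h1, pvRgoSucc]
    have h2 : List.drop (l0.length + 1) (l0 ++ '\n' :: t) = t :=
      pvDropShift l0 t 0
    rw [h2, pvRgoZero]
    by_cases hp : ['\n'].isPrefixOf t = true
    · rw [if_pos hp, if_pos hp]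
      rw [if_neg (by omega)]
      omega
    · rw [if_neg hp, if_neg hp, pvRat, if_pos rfl]
  | succ m ih =>
    intro hm
    have h1 : l0.length + 1 + (m + 1) = (l0.length + 1 + m) + 1 := by omega
    rw [h1, pvRgoSucc]
    have h2 : List.drop (l0.length + 1 + m + 1) (l0 ++ '\n' :: t) = List.drop (m+1) t :=
      pvDropShift l0 t (m+1)
    rw [h2, ih (by omega)]
    conv_rhs => rw [pvRgoSucc]
    have hge := pvRgoGe t ['\n'] m
    by_cases hp : ['\n'].isPrefixOf (List.drop (m+1) t) = true
    · rw [if_pos hp, if_pos hp, if_neg (by omega)]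
      omega
    · rw [if_neg hp, if_neg hp]

-- R2: rfind of ['\n'] over l0 ++ '\n' :: t
theorem pvR2 (l0 t : List Char) :
    PySem.Chars.rfind (l0 ++ '\n' :: t) ['\n'] =
      if PySem.Chars.rfind t ['\n'] = -1 then (l0.length : Int)
      else (l0.length : Int) + 1 + PySem.Chars.rfind t ['\n'] := by
  show PySem.Chars.rfind.go (l0 ++ '\n' :: t) ['\n'] (l0 ++ '\n' :: t).length = _
  have hlen : (l0 ++ '\n' :: t).length = l0.length + 1 + t.length := by simp; omega
  rw [hlen, pvRshift l0 t t.length le_rfl]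
  rfl

-- the line decomposition
def pvLines : List Char → List (List Char)
  | [] => [[]]
  | c :: rest =>
    if c = '\n' then [] :: pvLines rest
    else
      match pvLines rest with
      | [] => [[c]]
      | l :: ls => (c :: l) :: ls

theorem pvLines_ne_nil (s : List Char) : pvLines s ≠ [] := by
  induction s with
  | nil => simp [pvLines]
  | cons c rest ih =>
    rw [pvLines]
    split_ifs
    · simp
    · cases h : pvLines rest <;> simp

theorem pvLines_no_nl (s : List Char) (h : '\n' ∉ s) : pvLines s = [s] := by
  induction s with
  | nil => rfl
  | cons c rest ih =>
    rw [pvLines, if_neg (by intro hc; exact h (hc ▸ List.mem_cons_self ..)),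
        ih (fun hm => h (List.mem_cons_of_mem c hm))]

theorem pvLines_append (l0 : List Char) (h : '\n' ∉ l0) (s' : List Char) :
    pvLines (l0 ++ '\n' :: s') = l0 :: pvLines s' := by
  induction l0 with
  | nil => simp [pvLines]
  | cons c t ih =>
    have hc : c ≠ '\n' := fun hc => h (hc ▸ List.mem_cons_self ..)
    rw [List.cons_append, pvLines, if_neg hc, ih (fun hm => h (List.mem_cons_of_mem c hm))]

theorem pvJoin (s : List Char) : PySem.Chars.join ['\n'] (pvLines s) = s := by
  induction s with
  | nil => rfl
  | cons c rest ih =>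
    rw [pvLines]
    by_cases hc : c = '\n'
    · rw [if_pos hc]
      obtain ⟨l, ls, hl⟩ : ∃ l ls, pvLines rest = l :: ls := by
        cases h : pvLines rest with
        | nil => exact absurd h (pvLines_ne_nil rest)
        | cons l ls => exact ⟨l, ls, rfl⟩
      rw [hl, PySem.Chars.join_cons_cons, ← hl, ih, hc]
      simp
    · rw [if_neg hc]
      cases h : pvLines rest with
      | nil => exact absurd h (pvLines_ne_nil rest)
      | cons l ls =>
        rw [h] at ih
        cases ls with
        | nil =>
          rw [PySem.Chars.join_singleton] at ih ⊢
          rw [ih]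
        | cons q qs =>
          rw [PySem.Chars.join_cons_cons] at ih
          rw [PySem.Chars.join_cons_cons]
          simp only [List.cons_append]
          rw [ih]

-- splitOn.go computes pvLines
theorem pvSplitGo : ∀ (fuel : Nat) (l cur : List Char) (acc : List (List Char)), l.length < fuel →
    PySem.Chars.splitOn.go ['\n'] fuel l cur acc =
      acc.reverse ++ ((cur.reverse ++ (pvLines l).headI) :: (pvLines l).tail) := by
  intro fuel
  induction fuel with
  | zero => intro l cur acc h; omega
  | succ fuel ih =>
    intro l cur acc h
    cases l with
    | nil =>
      show (cur.reverse :: acc).reverse = _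
      simp [pvLines]
    | cons c rest =>
      rw [show PySem.Chars.splitOn.go ['\n'] (fuel+1) (c :: rest) cur acc =
            if ['\n'].isPrefixOf (c :: rest) then
              PySem.Chars.splitOn.go ['\n'] fuel (List.drop 1 (c::rest)) [] (cur.reverse :: acc)
            else PySem.Chars.splitOn.go ['\n'] fuel rest (c :: cur) acc from rfl]
      by_cases hc : c = '\n'
      · rw [if_pos (by simp [List.isPrefixOf, hc])]
        rw [List.drop_one, List.tail_cons, ih rest [] (cur.reverse :: acc) (by simp at h; omega)]
        subst hc
        rw [pvLines, if_pos rfl]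
        cases hrest : pvLines rest with
        | nil => exact absurd hrest (pvLines_ne_nil rest)
        | cons l ls => simp
      · rw [if_neg (by simp [List.isPrefixOf]; exact fun h' => hc h'.symm)]
        rw [ih rest (c :: cur) acc (by simp at h ⊢; omega)]
        rw [pvLines, if_neg hc]
        cases hrest : pvLines rest with
        | nil => exact absurd hrest (pvLines_ne_nil rest)
        | cons l ls => simp

theorem pvSplitOn (s : List Char) : PySem.Chars.splitOn s ['\n'] = pvLines s := by
  show PySem.Chars.splitOn.go ['\n'] (s.length + 1) s [] [] = _
  rw [pvSplitGo (s.length + 1) s [] [] (by omega)]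
  cases h : pvLines s with
  | nil => exact absurd h (pvLines_ne_nil s)
  | cons l ls => simp

theorem pvRfindGe (s sub : List Char) : -1 ≤ PySem.Chars.rfind s sub := pvRgoGe s sub s.length

theorem pvRFF (s sub : List Char) (idx : Int) (h0 : 0 ≤ idx) (h1 : idx ≤ (s.length : Int)) :
    PySem.Chars.rfindFrom s sub 0 (some idx) = PySem.Chars.rfind (List.take idx.toNat s) sub := by
  simp only [PySem.Chars.rfindFrom]
  rw [if_neg (by omega : ¬ ((s.length : Int) < idx)), if_neg (by omega : ¬ (idx < (0:Int)))]
  rw [if_neg (by omega : ¬ ((0:Int) < 0)), if_neg (by omega : ¬ (idx < (0:Int)))]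
  simp only [Int.toNat_zero, List.drop_zero]
  have hge := pvRfindGe (List.take idx.toNat s) sub
  by_cases hr : PySem.Chars.rfind (List.take idx.toNat s) sub = -1
  · rw [if_pos hr, hr]
  · rw [if_neg hr]; omega

def pvP : List Char := "plt.savefig".toList

def pvInd (l : List Char) : List Char :=
  List.replicate (((l.length : Int) - ((PySem.Chars.lstrip l).length : Int)).toNat) ' '

def pvAchars (call : List Char) : List (List Char) → List (List Char)
  | [] => []
  | l :: ls => if PySem.Chars.isIn pvP l then (pvInd l ++ call) :: l :: ls else l :: pvAchars call ls

def pvLS (s : List Char) : Int :=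
  PySem.Chars.rfindFrom s ['\n'] 0 (some (PySem.Chars.find s pvP)) + 1

def pvRest (s : List Char) : List Char := List.drop (pvLS s).toNat s

def pvLine (s : List Char) : List Char :=
  if PySem.Chars.find (pvRest s) ['\n'] = -1 then pvRest s
  else List.take (PySem.Chars.find (pvRest s) ['\n']).toNat (pvRest s)

def pvBchars (call s : List Char) : List Char :=
  List.take (pvLS s).toNat s ++ pvInd (pvLine s) ++ call ++ '\n' :: pvRest s

theorem pvAchars_ne_nil (call : List Char) (css : List (List Char)) (h : css ≠ []) :
    pvAchars call css ≠ [] := by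
  cases css with
  | nil => exact absurd rfl h
  | cons l ls =>
    rw [pvAchars]
    split_ifs <;> simp

theorem pvSplitAtNL : ∀ (s : List Char), '\n' ∈ s → ∃ l0 s', s = l0 ++ '\n' :: s' ∧ '\n' ∉ l0 := by
  intro s
  induction s with
  | nil => intro h; cases h
  | cons c rest ih =>
    intro h
    by_cases hc : c = '\n'
    · exact ⟨[], rest, by rw [hc]; simp, by simp⟩
    · have : '\n' ∈ rest := by
        cases List.mem_cons.mp h with
        | inl h' => exact absurd h'.symm hc
        | inr h' => exact h'
      obtain ⟨l0, s', hs, hl0⟩ := ih this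
      exact ⟨c :: l0, s', by rw [hs]; simp, by
        intro hm
        cases List.mem_cons.mp hm with
        | inl h' => exact hc h'.symm
        | inr h' => exact hl0 h'⟩

theorem pvTakeShift (l0 t : List Char) (m : Nat) :
    List.take (l0.length + 1 + m) (l0 ++ '\n' :: t) = l0 ++ '\n' :: List.take m t := by
  rw [List.take_append, List.take_of_length_le (by omega)]
  have h : l0.length + 1 + m - l0.length = m + 1 := by omega
  rw [h, List.take_succ_cons]

-- the main equivalence: A's line-list surgery equals B's raw splice
theorem pvMain (call : List Char) : ∀ (n : Nat) (s : List Char), s.length ≤ n →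
    PySem.Chars.isIn pvP s = true →
    PySem.Chars.join ['\n'] (pvAchars call (pvLines s)) = pvBchars call s := by
  intro n
  induction n with
  | zero =>
    intro s hlen hin
    have : s = [] := List.eq_nil_of_length_eq_zero (Nat.le_zero.mp hlen)
    subst this
    exact absurd hin (by decide)
  | succ n ih =>
    intro s hlen hin
    have hidx0 : 0 ≤ PySem.Chars.find s pvP :=
      (PySem.Chars.find_nonneg_iff s pvP).mpr ((PySem.Chars.isIn_iff_infix pvP s).mp hin)
    have hidx1 : PySem.Chars.find s pvP ≤ (s.length : Int) := PySem.Chars.find_le_length s pvP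
    by_cases hmem : '\n' ∈ s
    · obtain ⟨l0, s', rfl, hl0⟩ := pvSplitAtNL s hmem
      by_cases hP : PySem.Chars.isIn pvP l0 = true
      · -- match in the first line
        have hfind : PySem.Chars.find (l0 ++ '\n' :: s') pvP = PySem.Chars.find l0 pvP :=
          pvF2 pvP (by decide) (by decide) l0 s' hP
        have hidxl0 : PySem.Chars.find l0 pvP ≤ (l0.length : Int) := PySem.Chars.find_le_length l0 pvP
        have hidx0' : 0 ≤ PySem.Chars.find l0 pvP := hfind ▸ hidx0
        have htake : List.take (PySem.Chars.find l0 pvP).toNat (l0 ++ '\n' :: s')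
            = List.take (PySem.Chars.find l0 pvP).toNat l0 :=
          List.take_append_of_le_length (by omega)
        have hLS : pvLS (l0 ++ '\n' :: s') = 0 := by
          rw [pvLS, hfind, pvRFF _ _ _ hidx0' (by simp; omega), htake,
              pvR1 _ (fun hm => hl0 (List.mem_of_mem_take hm))]
          omega
        have hrest : pvRest (l0 ++ '\n' :: s') = l0 ++ '\n' :: s' := by
          rw [pvRest, hLS]; rfl
        have hnl : PySem.Chars.find (pvRest (l0 ++ '\n' :: s')) ['\n'] = (l0.length : Int) := by
          rw [hrest]; exact pvN1 l0 s' hl0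
        have hline : pvLine (l0 ++ '\n' :: s') = l0 := by
          rw [pvLine, hnl, if_neg (by omega), hrest]
          simp
        rw [pvBchars, hLS, hline, hrest, pvLines_append l0 hl0 s', pvAchars, if_pos hP,
            PySem.Chars.join_cons_cons, ← pvLines_append l0 hl0 s', pvJoin]
        simp
      · -- match beyond the first line
        have hP' : PySem.Chars.isIn pvP l0 = false := by
          cases h : PySem.Chars.isIn pvP l0 with
          | false => rfl
          | true => exact absurd h hP
        have hF1 := pvF1 pvP (by decide) (by decide) l0 s' hP'
        have hin' : 0 ≤ PySem.Chars.find s' pvP := by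
          have hge := pvFindGe s' pvP
          by_cases h : PySem.Chars.find s' pvP = -1
          · rw [hF1, if_pos h] at hidx0; omega
          · omega
        have hisin' : PySem.Chars.isIn pvP s' = true :=
          (PySem.Chars.isIn_iff_infix pvP s').mpr ((PySem.Chars.find_nonneg_iff s' pvP).mp hin')
        have hidx : PySem.Chars.find (l0 ++ '\n' :: s') pvP
            = (l0.length : Int) + 1 + PySem.Chars.find s' pvP := by
          rw [hF1, if_neg (by omega)]
        have hidx1' : PySem.Chars.find s' pvP ≤ (s'.length : Int) := PySem.Chars.find_le_length s' pvP
        have htoNat : (PySem.Chars.find (l0 ++ '\n' :: s') pvP).toNat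
            = l0.length + 1 + (PySem.Chars.find s' pvP).toNat := by omega
        have htake : List.take (PySem.Chars.find (l0 ++ '\n' :: s') pvP).toNat (l0 ++ '\n' :: s')
            = l0 ++ '\n' :: List.take (PySem.Chars.find s' pvP).toNat s' := by
          rw [htoNat]; exact pvTakeShift l0 s' _
        have hr' := pvRfindGe (List.take (PySem.Chars.find s' pvP).toNat s') ['\n']
        have hLS : pvLS (l0 ++ '\n' :: s') = (l0.length : Int) + 1 + pvLS s' := by
          rw [pvLS, pvLS, pvRFF _ _ _ hidx0 (by simpa using hidx1), htake, pvR2,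
              pvRFF _ _ _ hin' hidx1']
          split_ifs <;> omega
        have hLS0 : 0 ≤ pvLS s' := by
          rw [pvLS, pvRFF _ _ _ hin' hidx1']
          have := pvRfindGe (List.take (PySem.Chars.find s' pvP).toNat s') ['\n']
          omega
        have hLSnat : (pvLS (l0 ++ '\n' :: s')).toNat = l0.length + 1 + (pvLS s').toNat := by omega
        have hrest : pvRest (l0 ++ '\n' :: s') = pvRest s' := by
          rw [pvRest, pvRest, hLSnat, pvDropShift]
        have hline : pvLine (l0 ++ '\n' :: s') = pvLine s' := by
          rw [pvLine, pvLine, hrest]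
        have hlen' : s'.length ≤ n := by simp at hlen; omega
        have hBtake : List.take (pvLS (l0 ++ '\n' :: s')).toNat (l0 ++ '\n' :: s')
            = l0 ++ '\n' :: List.take (pvLS s').toNat s' := by
          rw [hLSnat]; exact pvTakeShift l0 s' _
        rw [pvLines_append l0 hl0 s', pvAchars, if_neg (by rw [hP']; simp)]
        obtain ⟨x, xs, hx⟩ : ∃ x xs, pvAchars call (pvLines s') = x :: xs := by
          cases h : pvAchars call (pvLines s') with
          | nil => exact absurd h (pvAchars_ne_nil call _ (pvLines_ne_nil s'))
          | cons x xs => exact ⟨x, xs, rfl⟩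
        rw [hx, PySem.Chars.join_cons_cons, ← hx, ih s' hlen' hisin',
            pvBchars, pvBchars, hBtake, hline, hrest]
        simp
    · -- single line
      have hLS : pvLS s = 0 := by
        rw [pvLS, pvRFF _ _ _ hidx0 hidx1,
            pvR1 _ (fun hm => hmem (List.mem_of_mem_take hm))]
        omega
      have hrest : pvRest s = s := by rw [pvRest, hLS]; rfl
      have hline : pvLine s = s := by
        rw [pvLine, hrest, pvN2 s hmem, if_pos rfl]
      rw [pvBchars, hLS, hline, hrest, pvLines_no_nl s hmem, pvAchars, if_pos hin,
          PySem.Chars.join_cons_cons, PySem.Chars.join_singleton]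
      simp

theorem pvStr (a : List Char) (c : String) : String.ofList a ++ c = String.ofList (a ++ c.toList) := by
  conv_lhs => rw [show String.ofList a ++ c = String.ofList ((String.ofList a ++ c).toList) by simp]
  simp

theorem pvA_loop_cons (code : String) (lines : List String) (i : Int) (line : String)
    (rest : List (Int × String)) :
    pvA_loop code lines ((i, line) :: rest) =
      if PySem.Str.isIn "plt.savefig" line then
        PySem.List.insert lines i
          (if PySem.Str.isIn "plt.subplots" code && PySem.Str.isIn "fig" code then
            String.ofList (List.replicate (PySem.Str.len line -
              PySem.Str.len (PySem.Str.lstrip line)).toNat ' ') ++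
              "desensitized_plot(fig, use_subplots=True)\n"
          else
            String.ofList (List.replicate (PySem.Str.len line -
              PySem.Str.len (PySem.Str.lstrip line)).toNat ' ') ++
              "desensitized_plot(plt)\n")
      else pvA_loop code lines rest := rfl

theorem pvLoopA (code call : String)
    (hcall : call = (if PySem.Str.isIn "plt.subplots" code && PySem.Str.isIn "fig" code then
      "desensitized_plot(fig, use_subplots=True)\n" else "desensitized_plot(plt)\n")) :
    ∀ (css : List (List Char)) (pre : List String),
      pvA_loop code (pre ++ css.map String.ofList)
          (PySem.List.enumerate (css.map String.ofList) (pre.length : Int))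
        = pre ++ (pvAchars call.toList css).map String.ofList := by
  intro css
  induction css with
  | nil => intro pre; simp [pvA_loop, pvAchars]
  | cons l ls ihl =>
    intro pre
    rw [List.map_cons, PySem.List.enumerate_cons]
    by_cases h : PySem.Chars.isIn pvP l = true
    · have hs : PySem.Str.isIn "plt.savefig" (String.ofList l) = true := by
        rw [PySem.Str.isIn_eq]
        simpa using h
      rw [pvA_loop_cons, if_pos hs]
      have hadd :
          (if PySem.Str.isIn "plt.subplots" code && PySem.Str.isIn "fig" code then
            String.ofList (List.replicate (PySem.Str.len (String.ofList l) -
              PySem.Str.len (PySem.Str.lstrip (String.ofList l))).toNat ' ') ++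
              "desensitized_plot(fig, use_subplots=True)\n"
          else
            String.ofList (List.replicate (PySem.Str.len (String.ofList l) -
              PySem.Str.len (PySem.Str.lstrip (String.ofList l))).toNat ' ') ++
              "desensitized_plot(plt)\n")
          = String.ofList (pvInd l ++ call.toList) := by
        subst hcall
        by_cases hc : (PySem.Str.isIn "plt.subplots" code && PySem.Str.isIn "fig" code) = true
        · rw [if_pos hc, if_pos hc, pvStr]
          simp [pvInd, PySem.Str.len, PySem.Str.lstrip]
        · rw [if_neg hc, if_neg hc, pvStr]
          simp [pvInd, PySem.Str.len, PySem.Str.lstrip]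
      rw [hadd, PySem.List.insert_natCast (pre ++ String.ofList l :: ls.map String.ofList)
            pre.length _ (by simp), List.take_left, List.drop_left]
      rw [pvAchars, if_pos h]
      simp
    · have hs : PySem.Str.isIn "plt.savefig" (String.ofList l) = false := by
        rw [PySem.Str.isIn_eq]
        simpa using h
      rw [pvA_loop_cons, if_neg (by rw [hs]; simp)]
      have h1 : (pre.length : Int) + 1 = (((pre ++ [String.ofList l]).length : Nat) : Int) := by
        simp
      have h2 : pre ++ String.ofList l :: ls.map String.ofList
          = (pre ++ [String.ofList l]) ++ ls.map String.ofList := by simp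
      rw [h1, h2, ihl (pre ++ [String.ofList l]), pvAchars, if_neg h]
      simp

theorem pvLS_eq (code : String) :
    PySem.Str.rfindFrom code "\n" 0 (some (PySem.Str.find code "plt.savefig")) + 1
      = pvLS code.toList := rfl

theorem pvLS_nonneg (s : List Char) (h0 : 0 ≤ PySem.Chars.find s pvP) : 0 ≤ pvLS s := by
  rw [pvLS, pvRFF _ _ _ h0 (PySem.Chars.find_le_length s pvP)]
  have := pvRfindGe (List.take (PySem.Chars.find s pvP).toNat s) ['\n']
  omega

theorem pvAltMain (code : String) (hg : ¬ (!PySem.Str.isIn "plt.savefig" code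
      || PySem.Str.isIn "desensitized_plot" code) = true)
    (call : String)
    (hcall : call = (if PySem.Str.isIn "plt.subplots" code && PySem.Str.isIn "fig" code then
      "desensitized_plot(fig, use_subplots=True)\n" else "desensitized_plot(plt)\n")) :
    insert_desensitized_plot_call_alt code = String.ofList (pvBchars call.toList code.toList) := by
  have hc1 : PySem.Str.isIn "plt.savefig" code = true := by
    cases h : PySem.Str.isIn "plt.savefig" code with
    | true => rfl
    | false => exact absurd (by rw [h]; simp) hg
  have h0 : 0 ≤ PySem.Chars.find code.toList pvP := by
    rw [PySem.Chars.find_nonneg_iff]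
    rw [PySem.Str.isIn_eq] at hc1
    exact (PySem.Chars.isIn_iff_infix _ _).mp hc1
  have hL0 : 0 ≤ pvLS code.toList := pvLS_nonneg _ h0
  have hrest : PySem.Str.slice code (some (pvLS code.toList)) none
      = String.ofList (pvRest code.toList) := by
    rw [PySem.Str.slice, pvRest]
    congr 1
    rw [PySem.Chars.slice_eq_listSlice, PySem.List.slice_from _ hL0]
  have htake : PySem.Str.slice code none (some (pvLS code.toList))
      = String.ofList (List.take (pvLS code.toList).toNat code.toList) := by
    rw [PySem.Str.slice]
    congr 1
    rw [PySem.Chars.slice_eq_listSlice, PySem.List.slice_to _ hL0]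
  have hnl : PySem.Str.find (String.ofList (pvRest code.toList)) "\n"
      = PySem.Chars.find (pvRest code.toList) ['\n'] := by
    rw [PySem.Str.find]
    simp
  have hline : (if PySem.Str.find (String.ofList (pvRest code.toList)) "\n" = -1 then
        String.ofList (pvRest code.toList)
      else PySem.Str.slice (String.ofList (pvRest code.toList)) none
        (some (PySem.Str.find (String.ofList (pvRest code.toList)) "\n")))
      = String.ofList (pvLine code.toList) := by
    rw [hnl, pvLine]
    by_cases hn : PySem.Chars.find (pvRest code.toList) ['\n'] = -1
    · rw [if_pos hn, if_pos hn]
    · rw [if_neg hn, if_neg hn, PySem.Str.slice]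
      congr 1
      rw [PySem.Chars.slice_eq_listSlice]
      have hnn : 0 ≤ PySem.Chars.find (pvRest code.toList) ['\n'] := by
        have := pvFindGe (pvRest code.toList) ['\n']
        omega
      simp [PySem.List.slice_to _ hnn]
  have hindent : String.ofList (List.replicate
        (PySem.Str.len (String.ofList (pvLine code.toList)) -
          PySem.Str.len (PySem.Str.lstrip (String.ofList (pvLine code.toList)))).toNat ' ')
      = String.ofList (pvInd (pvLine code.toList)) := by
    simp [pvInd, PySem.Str.len, PySem.Str.lstrip]
  rw [insert_desensitized_plot_call_alt]
  rw [if_neg hg]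
  show PySem.Str.slice code none (some (pvLS code.toList)) ++ _ ++ _ ++ _ ++ _ = _
  rw [htake, pvLS_eq, hrest, hline, hindent, ← hcall]
  rw [pvStr, pvStr, pvStr, pvStr]
  rw [pvBchars]
  simp

theorem pvFinal (code : String) :
    insert_desensitized_plot_call code = insert_desensitized_plot_call_alt code := by
  by_cases c1 : PySem.Str.isIn "plt.savefig" code = true
  · by_cases c2 : PySem.Str.isIn "desensitized_plot" code = true
    · rw [insert_desensitized_plot_call, insert_desensitized_plot_call_alt,
          if_neg (by rw [c1, c2]; simp), if_pos (by rw [c2]; simp)]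
    · have hc2 : PySem.Str.isIn "desensitized_plot" code = false := by
        cases h : PySem.Str.isIn "desensitized_plot" code with
        | true => exact absurd h c2
        | false => rfl
      have hg : ¬ (!PySem.Str.isIn "plt.savefig" code
          || PySem.Str.isIn "desensitized_plot" code) = true := by
        rw [c1, hc2]; simp
      have hin : PySem.Chars.isIn pvP code.toList = true := by
        rw [PySem.Str.isIn_eq] at c1
        exact c1
      rw [insert_desensitized_plot_call, if_pos (by rw [c1, hc2]; simp)]
      rw [pvAltMain code hg _ rfl]
      have hsplit : (PySem.Str.split? code "\n").getD []
          = (pvLines code.toList).map String.ofList := by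
        rw [PySem.Str.split?]
        rw [show ("\n" : String).toList = ['\n'] from rfl]
        rw [PySem.Chars.split?, if_neg (by simp), pvSplitOn]
        rfl
      show PySem.Str.join "\n" (pvA_loop code ((PySem.Str.split? code "\n").getD [])
        (PySem.List.enumerate ((PySem.Str.split? code "\n").getD []) 0)) = _
      rw [hsplit]
      have hloop := pvLoopA code _ rfl (pvLines code.toList) []
      simp only [List.nil_append, List.length_nil, Nat.cast_zero] at hloop
      rw [hloop]
      have hjoin : PySem.Str.join "\n"
          ((pvAchars (if PySem.Str.isIn "plt.subplots" code && PySem.Str.isIn "fig" code then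
              ("desensitized_plot(fig, use_subplots=True)\n" : String)
            else "desensitized_plot(plt)\n").toList (pvLines code.toList)).map String.ofList)
          = String.ofList (PySem.Chars.join ['\n']
            (pvAchars (if PySem.Str.isIn "plt.subplots" code && PySem.Str.isIn "fig" code then
              ("desensitized_plot(fig, use_subplots=True)\n" : String)
            else "desensitized_plot(plt)\n").toList (pvLines code.toList))) := by
        rw [PySem.Str.join]
        congr 1
        simp [List.map_map, Function.comp_def]
      rw [hjoin]
      exact congrArg String.ofList (pvMain _ code.toList.length code.toList le_rfl hin)
  · have hc1 : PySem.Str.isIn "plt.savefig" code = false := by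
      cases h : PySem.Str.isIn "plt.savefig" code with
      | true => exact absurd h c1
      | false => rfl
    rw [insert_desensitized_plot_call, insert_desensitized_plot_call_alt,
        if_neg (by rw [hc1]; simp), if_pos (by rw [hc1]; simp)]

-- ===== VERDICT (by name: the statement is the Claim_ definition above) =====
theorem insert_desensitized_plot_call_spec : Claim_equal_insert_desensitized_plot_call := by
  unfold Claim_equal_insert_desensitized_plot_call Spec_insert_desensitized_plot_call
  intro code _
  exact pvFinal code
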